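-- pv_equiv track=rewrite | github.com/ewnike/NHL-Beyond-27 | build_player_streaks_and_aligned.py | streaks_from_years
-- ===== SOURCE A (Python) =====
-- def streaks_from_years(years: list[int]) -> list[tuple[int, int, int]]:
--     """Return list of (start_year, end_year, length) for maximal consecutive runs."""
--     ys = sorted(set(years))
--     if not ys:
--         return []
--     out = []
--     run_s = prev = ys[0]
--     for y in ys[1:]:
--         if y == prev + 1:
--             prev = y
--         else:
--             out.append((run_s, prev, prev - run_s + 1))
--             run_s = prev = y
--     out.append((run_s, prev, prev - run_s + 1))
--     return out
-- ===== SOURCE B (Python) =====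
-- def streaks_from_years(years: list[int]) -> list[tuple[int, int, int]]:
--     """Return list of (start_year, end_year, length) for maximal consecutive runs.
--
--     Set-membership run detection (no sorting of the data): a year y starts a
--     maximal run iff y-1 is absent from the set; walk forward through the set to
--     find the run's end.  Only the handful of run tuples are sorted at the end.
--     """
--     s = set(years)
--     out = []
--     for y in s:
--         if y - 1 not in s:
--             e = y
--             while e + 1 in s:
--                 e += 1
--             out.append((y, e, e - y + 1))
--     out.sort(key=lambda t: t[0])
--     return out
-- ===== Notes on version B (the rewrite author's own statement) =====
-- stated objective: alternative
-- what changed: Instead of A's sort-then-linear-scan state machine, B never sorts the data: it detects run starts by set membership (y is a start iff y-1 is not in the set), walks each run forward through the set to its end, and only sorts the handful of resulting run tuples.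
import Mathlib
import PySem

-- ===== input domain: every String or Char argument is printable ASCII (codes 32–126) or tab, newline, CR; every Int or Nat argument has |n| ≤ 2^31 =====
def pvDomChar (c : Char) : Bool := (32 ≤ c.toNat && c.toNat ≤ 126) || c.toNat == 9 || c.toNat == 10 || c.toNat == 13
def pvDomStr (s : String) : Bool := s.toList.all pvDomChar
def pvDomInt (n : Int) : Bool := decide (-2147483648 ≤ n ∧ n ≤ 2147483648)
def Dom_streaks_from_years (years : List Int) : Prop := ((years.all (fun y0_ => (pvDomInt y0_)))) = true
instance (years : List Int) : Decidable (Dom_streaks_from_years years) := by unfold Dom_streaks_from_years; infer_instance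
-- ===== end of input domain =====

-- B replaces A's sort-then-scan state machine by set-membership run detection:
-- run starts are years without a predecessor in the set, run ends are found by
-- walking the set forward; only the run tuples are sorted (objective: alternative).

-- ===== PORT A =====
-- loop body of A's for-loop over ys[1:], state = (out, run_s, prev)
def pvStepA (s : List (Int × Int × Int) × Int × Int) (y : Int) : List (Int × Int × Int) × Int × Int :=
  if y = s.2.2 + 1 then (s.1, s.2.1, y)
  else (s.1 ++ [(s.2.1, s.2.2, s.2.2 - s.2.1 + 1)], y, y)

def streaks_from_years (years : List Int) : List (Int × Int × Int) :=
  let ys := PySem.List.sorted (PySem.Set.ofList years) (fun x => x) false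
  match ys with
  | [] => []
  | y0 :: rest =>
    let st := rest.foldl pvStepA ([], y0, y0)
    st.1 ++ [(st.2.1, st.2.2, st.2.2 - st.2.1 + 1)]

-- ===== PORT B =====
-- termination helper for B's inner while loop (cited in decreasing_by)
theorem pvWalk_measure (s : List Int) (e : Int) (h : e + 1 ∈ s) :
    (s.filter (fun x => e + 1 < x)).length < (s.filter (fun x => e < x)).length := by
  induction s with
  | nil => cases h
  | cons a s ih =>
    rcases List.mem_cons.mp h with h1 | h1
    · subst h1
      simp only [List.filter_cons]
      have h2 : ¬ (e + 1 < e + 1) := by omega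
      have h3 : e < e + 1 := by omega
      simp only [h2, h3, decide_true, decide_false, if_true, List.length_cons]
      simp only [Bool.false_eq_true, if_false]
      have : (s.filter (fun x => decide (e + 1 < x))).length ≤ (s.filter (fun x => decide (e < x))).length := by
        apply List.Sublist.length_le
        exact List.monotone_filter_right s (by intro x hx; simp_all; omega)
      omega
    · have h4 := ih h1
      simp only [List.filter_cons]
      by_cases h5 : e + 1 < a
      · have h6 : e < a := by omega
        simp [h5, h6]; omega
      · by_cases h6 : e < a
        · simp [h5, h6]; omega
        · simp [h5, h6]; omega

-- B's inner while loop: e = y; while e+1 in s: e += 1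
def pvWalk (s : List Int) (e : Int) : Int :=
  if h : (e + 1) ∈ s then pvWalk s (e + 1) else e
  termination_by (s.filter (fun x => e < x)).length
  decreasing_by exact pvWalk_measure s e h

def streaks_from_years_alt (years : List Int) : List (Int × Int × Int) :=
  let s := PySem.Set.ofList years
  let out := s.foldl (fun out y =>
    if (y - 1) ∉ s then
      out ++ [(y, pvWalk s y, pvWalk s y - y + 1)]
    else out) []
  PySem.List.sorted out (fun t => t.1) false

-- ===== PRECONDITION & SPEC =====
def Spec_streaks_from_years (years : List Int) (out : List (Int × Int × Int)) : Prop := out = streaks_from_years_alt years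
instance (years : List Int) (out : List (Int × Int × Int)) : Decidable (Spec_streaks_from_years years out) := by unfold Spec_streaks_from_years; infer_instance

-- ===== CLAIM (what is proved, stated in full; the proofs are below) =====
def Claim_equal_streaks_from_years : Prop := ∀ (years : List Int), Dom_streaks_from_years years → Spec_streaks_from_years years (streaks_from_years years)

-- ===== LEMMAS AND PROOFS =====
-- recursive characterisation of A's loop
def pvLoopA (run_s prev : Int) : List Int → List (Int × Int × Int)
  | [] => [(run_s, prev, prev - run_s + 1)]
  | y :: r => if y = prev + 1 then pvLoopA run_s y r
              else (run_s, prev, prev - run_s + 1) :: pvLoopA y y r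

theorem foldA (r : List Int) (out : List (Int × Int × Int)) (run_s prev : Int) :
    (r.foldl pvStepA (out, run_s, prev)).1 ++
      [((r.foldl pvStepA (out, run_s, prev)).2.1, (r.foldl pvStepA (out, run_s, prev)).2.2,
        (r.foldl pvStepA (out, run_s, prev)).2.2 - (r.foldl pvStepA (out, run_s, prev)).2.1 + 1)]
      = out ++ pvLoopA run_s prev r := by
  induction r generalizing out run_s prev with
  | nil => simp [pvLoopA]
  | cons y r ih =>
    simp only [List.foldl_cons, pvLoopA]
    by_cases h : y = prev + 1
    · rw [show pvStepA (out, run_s, prev) y = (out, run_s, y) from by simp [pvStepA, h]]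
      simp [h, ih]
    · rw [show pvStepA (out, run_s, prev) y = (out ++ [(run_s, prev, prev - run_s + 1)], y, y) from by simp [pvStepA, h]]
      simp [h, ih, List.append_assoc]

-- maximal +1-chain prefix of a list, and the remainder
def pvChain (prev : Int) : List Int → List Int
  | [] => []
  | z :: r => if z = prev + 1 then z :: pvChain z r else []

def pvRest (prev : Int) : List Int → List Int
  | [] => []
  | z :: r => if z = prev + 1 then pvRest z r else z :: r

theorem pvChain_append_rest (prev : Int) (r : List Int) :
    pvChain prev r ++ pvRest prev r = r := by
  induction r generalizing prev with
  | nil => rfl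
  | cons z r ih =>
    simp only [pvChain, pvRest]
    by_cases h : z = prev + 1 <;> simp [h, ih]

theorem pvChainLast (prev : Int) (r : List Int) :
    (pvChain prev r).getLastD prev = prev + ((pvChain prev r).length : Int) := by
  induction r generalizing prev with
  | nil => simp [pvChain]
  | cons z r ih =>
    simp only [pvChain]
    by_cases h : z = prev + 1
    · simp only [h, if_true, List.getLastD_cons, List.length_cons]
      rw [ih (prev + 1)]; push_cast; ring
    · simp [h]

theorem pvLoopA_chain (run_s prev : Int) (r : List Int) :
    pvLoopA run_s prev r =
      (run_s, (pvChain prev r).getLastD prev, (pvChain prev r).getLastD prev - run_s + 1) ::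
        (match pvRest prev r with
         | [] => []
         | z :: r' => pvLoopA z z r') := by
  induction r generalizing run_s prev with
  | nil => simp [pvLoopA, pvChain, pvRest]
  | cons z r ih =>
    simp only [pvLoopA, pvChain, pvRest]
    by_cases h : z = prev + 1
    · simp only [h, if_true, List.getLastD_cons]
      exact ih run_s (prev + 1)
    · simp [h]

-- the chain is a consecutive range of integers
theorem pvChain_eq_pyRange (prev : Int) (r : List Int) :
    pvChain prev r = PySem.List.pyRange (prev + 1) (prev + 1 + ((pvChain prev r).length : Int)) 1 := by
  induction r generalizing prev with
  | nil => simp [pvChain, PySem.List.pyRange_one_eq_nil]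
  | cons z r ih =>
    simp only [pvChain]
    by_cases h : z = prev + 1
    · simp only [h, if_true, List.length_cons]
      have hend : prev + 1 + (((pvChain (prev + 1) r).length + 1 : ℕ) : ℤ) = (prev + 1) + 1 + ((pvChain (prev + 1) r).length : ℤ) := by push_cast; ring
      rw [hend, PySem.List.pyRange_one_cons (by omega), ← ih (prev + 1)]
    · simp [h, PySem.List.pyRange_one_eq_nil]

-- pvWalk only depends on membership
theorem pvWalk_congr (s t : List Int) (e : Int) (h : ∀ x : Int, x ∈ s ↔ x ∈ t) :
    pvWalk s e = pvWalk t e := by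
  conv_lhs => rw [pvWalk]
  conv_rhs => rw [pvWalk]
  by_cases h1 : (e + 1) ∈ s
  · rw [dif_pos h1, dif_pos ((h (e+1)).mp h1)]
    exact pvWalk_congr s t (e + 1) h
  · rw [dif_neg h1, dif_neg (fun h2 => h1 ((h (e+1)).mpr h2))]
  termination_by (s.filter (fun x => e < x)).length
  decreasing_by exact pvWalk_measure s e h1

-- a prefix whose elements are all ≤ e never matters to pvWalk
theorem pvWalk_prefix (p q : List Int) (e : Int) (h : ∀ x ∈ p, x ≤ e) :
    pvWalk (p ++ q) e = pvWalk q e := by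
  conv_lhs => rw [pvWalk]
  conv_rhs => rw [pvWalk]
  by_cases h1 : (e + 1) ∈ q
  · rw [dif_pos (List.mem_append.mpr (Or.inr h1)), dif_pos h1]
    exact pvWalk_prefix p q (e + 1) (fun x hx => by have := h x hx; omega)
  · have h2 : (e + 1) ∉ p ++ q := by
      intro hm
      rcases List.mem_append.mp hm with hm | hm
      · have := h _ hm; omega
      · exact h1 hm
    rw [dif_neg h2, dif_neg h1]
  termination_by ((p ++ q).filter (fun x => e < x)).length
  decreasing_by exact pvWalk_measure (p ++ q) e (List.mem_append.mpr (Or.inr h1))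

-- pvWalk walks exactly to the end of the consecutive block
theorem pvWalk_spec (s : List Int) (e : Int) (n : Nat)
    (hin : ∀ k : Nat, 1 ≤ k → k ≤ n → e + (k : Int) ∈ s)
    (hout : e + (n : Int) + 1 ∉ s) :
    pvWalk s e = e + (n : Int) := by
  induction n generalizing e with
  | zero =>
    rw [pvWalk, dif_neg (by simpa using hout)]; simp
  | succ n ih =>
    have h1 : e + 1 ∈ s := by simpa using hin 1 (by omega) (by omega)
    rw [pvWalk, dif_pos h1]
    have := ih (e + 1)
      (fun k hk1 hk2 => by
        have h2 := hin (k + 1) (by omega) (by omega)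
        rw [show e + 1 + (k : ℤ) = e + ((k + 1 : ℕ) : ℤ) from by push_cast; ring]
        exact h2)
      (by
        intro hm
        apply hout
        rw [show e + ((n + 1 : ℕ) : ℤ) + 1 = e + 1 + (n : ℤ) + 1 from by push_cast; ring]
        exact hm)
    rw [this]; push_cast; ring

-- the canonical A-side recursion
def pvStreaksA : List Int → List (Int × Int × Int)
  | [] => []
  | y0 :: r => pvLoopA y0 y0 r

-- every element of the rest is beyond the chain's end + 1
theorem pvRest_gt (prev : Int) (r : List Int) (hs : r.Pairwise (· < ·))
    (hgt : ∀ x ∈ r, prev < x) :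
    ∀ z ∈ pvRest prev r, (pvChain prev r).getLastD prev + 1 < z := by
  induction r generalizing prev with
  | nil => intro z hz; cases hz
  | cons a r ih =>
    simp only [pvChain, pvRest]
    by_cases h : a = prev + 1
    · subst h
      simp only [if_true, List.getLastD_cons]
      exact ih (prev + 1) hs.tail (fun x hx => (List.pairwise_cons.mp hs).1 x hx)
    · simp only [h, if_false, List.getLastD_nil]
      intro z hz
      have ha : prev < a := hgt a List.mem_cons_self
      have ha2 : prev + 1 < a := by omega
      rcases List.mem_cons.mp hz with h' | h'
      · omega
      · have := (List.pairwise_cons.mp hs).1 z h'; omega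

theorem pvMatch_eq (t : List Int) :
    (match t with | [] => ([] : List (Int × Int × Int)) | z :: r' => pvLoopA z z r') = pvStreaksA t := by
  cases t <;> rfl

-- MAIN A-side characterisation: for a strictly increasing list,
-- pvStreaksA lists exactly the runs started by years without a predecessor
theorem pvStreaksA_char_aux (n : Nat) : ∀ ys : List Int, ys.length ≤ n → ys.Pairwise (· < ·) →
    pvStreaksA ys = (ys.filter (fun y => decide ((y - 1) ∉ ys))).map
      (fun y => (y, pvWalk ys y, pvWalk ys y - y + 1)) := by
  induction n with
  | zero =>
    intro ys hlen hs
    cases ys with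
    | nil => rfl
    | cons y0 r => simp at hlen
  | succ n ih =>
    intro ys hlen hs
    cases ys with
    | nil => rfl
    | cons y0 r =>
    obtain ⟨c, hc⟩ : ∃ c, pvChain y0 r = c := ⟨_, rfl⟩
    obtain ⟨t, ht⟩ : ∃ t, pvRest y0 r = t := ⟨_, rfl⟩
    have hsplit : c ++ t = r := by rw [← hc, ← ht]; exact pvChain_append_rest y0 r
    subst hsplit
    have hgt : ∀ x ∈ c ++ t, y0 < x := (List.pairwise_cons.mp hs).1
    have hlastD : (pvChain y0 (c ++ t)).getLastD y0 = y0 + (c.length : Int) := by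
      rw [pvChainLast, hc]
    set prev : Int := y0 + (c.length : Int) with hprev
    have hcrange : c = PySem.List.pyRange (y0 + 1) (prev + 1) 1 := by
      have := pvChain_eq_pyRange y0 (c ++ t)
      rw [hc] at this
      rw [this]; congr 1; omega
    have hrest_gt : ∀ z ∈ t, prev + 1 < z := by
      intro z hz
      have := pvRest_gt y0 (c ++ t) hs.tail hgt z (by rw [ht]; exact hz)
      rw [hlastD] at this; exact this
    -- membership in ys decomposed
    have hmem : ∀ x : Int, x ∈ (y0 :: (c ++ t)) ↔ (y0 ≤ x ∧ x ≤ prev) ∨ x ∈ t := by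
      intro x
      constructor
      · intro hx
        rcases List.mem_cons.mp hx with hx | hx
        · subst hx; left; omega
        · rcases List.mem_append.mp hx with hx | hx
          · rw [hcrange] at hx
            have := PySem.List.mem_pyRange_one.mp hx
            left; omega
          · right; exact hx
      · intro hx
        rcases hx with ⟨h1, h2⟩ | hx
        · rcases eq_or_lt_of_le h1 with h' | h'
          · exact h' ▸ List.mem_cons_self
          · apply List.mem_cons.mpr; right
            apply List.mem_append.mpr; left
            rw [hcrange]; exact PySem.List.mem_pyRange_one.mpr ⟨by omega, by omega⟩
        · exact List.mem_cons.mpr (Or.inr (List.mem_append.mpr (Or.inr hx)))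
    have hprev1 : prev + 1 ∉ (y0 :: (c ++ t)) := by
      intro hx
      rcases (hmem _).mp hx with ⟨_, h2⟩ | hx
      · omega
      · have := hrest_gt _ hx; omega
    -- pvWalk from y0 reaches prev
    have hwalk0 : pvWalk (y0 :: (c ++ t)) y0 = prev := by
      rw [pvWalk_spec (y0 :: (c ++ t)) y0 c.length
        (fun k hk1 hk2 => (hmem _).mpr (Or.inl ⟨by omega, by omega⟩))
        (by rw [show y0 + (c.length : Int) + 1 = prev + 1 from rfl]; exact hprev1)]
    -- filter decomposition
    have hP0 : (decide ((y0 - 1) ∉ (y0 :: (c ++ t)))) = true := by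
      simp only [decide_eq_true_eq]
      intro hx
      rcases (hmem _).mp hx with ⟨h1, _⟩ | hx
      · omega
      · have := hrest_gt _ hx; omega
    have hPc : ∀ y ∈ c, (decide ((y - 1) ∉ (y0 :: (c ++ t)))) = false := by
      intro y hy
      rw [hcrange] at hy
      have hy' := PySem.List.mem_pyRange_one.mp hy
      simp only [decide_eq_false_iff_not, not_not]
      exact (hmem _).mpr (Or.inl ⟨by omega, by omega⟩)
    have hPt : ∀ y ∈ t, (decide ((y - 1) ∉ (y0 :: (c ++ t)))) = (decide ((y - 1) ∉ t)) := by
      intro y hy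
      have hy' := hrest_gt _ hy
      by_cases hmt : (y - 1) ∈ t
      · simp [hmt, (hmem _).mpr (Or.inr hmt)]
      · have : (y - 1) ∉ (y0 :: (c ++ t)) := by
          intro hx
          rcases (hmem _).mp hx with ⟨_, h2⟩ | hx
          · omega
          · exact hmt hx
        simp [hmt, this]
    -- walk congruence on rest elements
    have hwalk_t : ∀ y ∈ t, pvWalk (y0 :: (c ++ t)) y = pvWalk t y := by
      intro y hy
      have hy' := hrest_gt _ hy
      rw [show (y0 :: (c ++ t)) = (y0 :: c) ++ t from by simp]
      apply pvWalk_prefix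
      intro x hx
      have hxle : x ≤ prev := by
        rcases List.mem_cons.mp hx with hx | hx
        · subst hx; omega
        · rw [hcrange] at hx
          have := PySem.List.mem_pyRange_one.mp hx; omega
      omega
    -- rest is strictly increasing (suffix)
    have hts : t.Pairwise (· < ·) := hs.tail.sublist (List.sublist_append_right c t)
    -- assemble
    have hfilter : (y0 :: (c ++ t)).filter (fun y => decide ((y - 1) ∉ (y0 :: (c ++ t))))
        = y0 :: t.filter (fun y => decide ((y - 1) ∉ t)) := by
      have hcnil : c.filter (fun y => decide ((y - 1) ∉ (y0 :: (c ++ t)))) = [] := by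
        apply List.filter_eq_nil_iff.mpr
        intro y hy
        simp only [hPc y hy]
        exact Bool.false_ne_true
      rw [List.filter_cons]
      simp only [hP0, if_true, List.filter_append]
      rw [hcnil, List.filter_congr hPt]
      simp
    rw [show pvStreaksA (y0 :: (c ++ t)) = pvLoopA y0 y0 (c ++ t) from rfl, pvLoopA_chain,
        hlastD, ht, hfilter]
    simp only [List.map_cons, hwalk0]
    congr 1
    rw [pvMatch_eq, ih t (by simp at hlen ⊢; omega) hts]
    apply List.map_congr_left
    intro y hy
    rw [hwalk_t y (List.mem_of_mem_filter hy)]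

theorem pvStreaksA_char (ys : List Int) (hs : ys.Pairwise (· < ·)) :
    pvStreaksA ys = (ys.filter (fun y => decide ((y - 1) ∉ ys))).map
      (fun y => (y, pvWalk ys y, pvWalk ys y - y + 1)) :=
  pvStreaksA_char_aux ys.length ys le_rfl hs

-- B's fold builds the filtered map
theorem pvFoldB (s l : List Int) (acc : List (Int × Int × Int)) :
    l.foldl (fun out y =>
      if (y - 1) ∉ s then
        out ++ [(y, pvWalk s y, pvWalk s y - y + 1)]
      else out) acc
    = acc ++ (l.filter (fun y => decide ((y - 1) ∉ s))).map
        (fun y => (y, pvWalk s y, pvWalk s y - y + 1)) := by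
  induction l generalizing acc with
  | nil => simp
  | cons y l ih =>
    simp only [List.foldl_cons, List.filter_cons]
    by_cases h : (y - 1) ∉ s
    · rw [if_pos h, ih]
      simp [h]
    · rw [if_neg h, ih]
      simp [h]

-- ===== VERDICT (by name: the statement is the Claim_ definition above) =====
theorem streaks_from_years_spec : Claim_equal_streaks_from_years := by
  intro years _
  show streaks_from_years years = streaks_from_years_alt years
  simp only [streaks_from_years, streaks_from_years_alt]
  rw [pvFoldB]
  have hpair0 := PySem.List.sorted_ofList_pairwise_lt (xs := years)
  have hperm0 := PySem.List.sorted_perm (PySem.Set.ofList years) (fun x : Int => x) false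
  obtain ⟨s, hs⟩ : ∃ s, PySem.Set.ofList years = s := ⟨_, rfl⟩
  rw [hs]
  rw [hs] at hpair0 hperm0
  obtain ⟨ys, hys⟩ : ∃ ys, PySem.List.sorted s (fun x : Int => x) false = ys := ⟨_, rfl⟩
  rw [hys]
  rw [hys] at hpair0 hperm0
  have hmem : ∀ x : Int, x ∈ s ↔ x ∈ ys := fun x => (hperm0.mem_iff).symm
  -- B's raw run list re-expressed over ys
  have hraw : (s.filter (fun y => decide ((y - 1) ∉ s))).map
      (fun y => (y, pvWalk s y, pvWalk s y - y + 1))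
      = (s.filter (fun y => decide ((y - 1) ∉ ys))).map
          (fun y => (y, pvWalk ys y, pvWalk ys y - y + 1)) := by
    have hfil : s.filter (fun y => decide ((y - 1) ∉ s)) = s.filter (fun y => decide ((y - 1) ∉ ys)) := by
      apply List.filter_congr
      intro y _
      rw [decide_eq_decide]
      exact not_congr (hmem _)
    rw [hfil]
    apply List.map_congr_left
    intro y _
    rw [pvWalk_congr s ys y hmem]
  rw [List.nil_append, hraw]
  cases ys with
  | nil =>
    have : s = [] := hperm0.symm.eq_nil
    subst this
    rfl
  | cons y0 rest =>
    show (rest.foldl pvStepA ([], y0, y0)).1 ++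
        [((rest.foldl pvStepA ([], y0, y0)).2.1, (rest.foldl pvStepA ([], y0, y0)).2.2,
          (rest.foldl pvStepA ([], y0, y0)).2.2 - (rest.foldl pvStepA ([], y0, y0)).2.1 + 1)] = _
    have h1 := foldA rest [] y0 y0
    simp only [List.nil_append] at h1
    rw [h1, show pvLoopA y0 y0 rest = pvStreaksA (y0 :: rest) from rfl,
        pvStreaksA_char (y0 :: rest) hpair0]
    apply Eq.symm
    apply PySem.List.sorted_eq_of_perm_of_pairwise_lt
    · exact List.Perm.map _ (List.Perm.filter _ hperm0)
    · apply List.Pairwise.map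
      · intro a b h
        exact h
      · exact (hpair0.filter _).imp (fun {a b} h => h)
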